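-- pv_equiv track=rewrite | github.com/wffwf/checkascii | decode_Manchester.py | MCST_diff_from_2
-- ===== SOURCE A (Python) =====
-- def MCST_diff_from_2(str_bin):
--     ret = ''
--     for i in range(0, len(str_bin) // 2 - 1):
--         x1 = str_bin[i * 2:i * 2 + 2]
--         x2 = str_bin[i * 2 + 2:i * 2 + 4]
--         if x1 == x2:
--             ret += '0'
--         else:
--             ret += '1'
--     return ret
-- ===== SOURCE B (Python) =====
-- def MCST_diff_from_2(str_bin):
--     n = len(str_bin)
--     eq = [str_bin[i] == str_bin[i + 2] for i in range(max(n - 2, 0))]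
--     return ''.join('0' if eq[2 * k] and eq[2 * k + 1] else '1'
--                    for k in range(n // 2 - 1))
-- ===== Notes on version B (the rewrite author's own statement) =====
-- stated objective: alternative
-- what changed: Instead of slicing and comparing two-character chunks, B compares the string character-wise with itself shifted by two positions (one equality-bit list) and then emits the zero bit exactly when the two equality bits covering a chunk both hold; correct because adjacent chunks are equal iff both their characters match two positions later.
import Mathlib
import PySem

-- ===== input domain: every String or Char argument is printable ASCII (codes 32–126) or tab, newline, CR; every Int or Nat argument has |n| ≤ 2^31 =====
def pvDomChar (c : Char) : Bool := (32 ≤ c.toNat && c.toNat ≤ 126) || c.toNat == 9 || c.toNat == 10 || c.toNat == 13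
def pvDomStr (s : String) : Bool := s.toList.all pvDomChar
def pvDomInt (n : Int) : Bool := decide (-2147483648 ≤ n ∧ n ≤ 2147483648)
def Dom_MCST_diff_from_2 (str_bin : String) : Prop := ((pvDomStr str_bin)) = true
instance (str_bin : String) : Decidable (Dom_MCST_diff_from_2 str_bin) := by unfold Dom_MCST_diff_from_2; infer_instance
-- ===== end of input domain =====

-- B replaces A's 2-char slice comparison by a character-level shift-by-2 equality list combined pairwise (alternative algorithm, same cost).

-- ===== PORT A =====
-- literal port of A: loop i in range(0, len//2 - 1), slice twice per index, append '0'/'1'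
def MCST_diff_from_2 (str_bin : String) : String :=
  let l := str_bin.toList
  let ret := (PySem.List.pyRange 0 (PySem.Int.floordiv (l.length : Int) 2 - 1) 1).foldl
    (fun ret i =>
      let x1 := PySem.List.slice l (some (i * 2)) (some (i * 2 + 2))
      let x2 := PySem.List.slice l (some (i * 2 + 2)) (some (i * 2 + 4))
      if x1 = x2 then ret ++ ['0'] else ret ++ ['1']) ([] : List Char)
  String.ofList ret

-- ===== PORT B =====
-- s[i] for an index known to be in range (0 ≤ i < len), exact there
def pvAt (l : List Char) (i : Nat) : Char := l.getD i ' '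

-- literal port of B: eq[i] = (s[i] == s[i+2]) for i < n-2, then bit k = eq[2k] AND eq[2k+1]
def MCST_diff_from_2_alt (str_bin : String) : String :=
  let l := str_bin.toList
  let n := l.length
  let eq := (List.range (n - 2)).map (fun i => pvAt l i == pvAt l (i + 2))
  String.ofList ((List.range (n / 2 - 1)).map
    (fun k => if eq.getD (2 * k) false && eq.getD (2 * k + 1) false then '0' else '1'))

-- ===== PRECONDITION & SPEC =====
def Spec_MCST_diff_from_2 (str_bin : String) (out : String) : Prop := out = MCST_diff_from_2_alt str_bin
instance (str_bin : String) (out : String) : Decidable (Spec_MCST_diff_from_2 str_bin out) := by unfold Spec_MCST_diff_from_2; infer_instance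

-- ===== CLAIM (what is proved, stated in full; the proofs are below) =====
def Claim_equal_MCST_diff_from_2 : Prop := ∀ (str_bin : String), Dom_MCST_diff_from_2 str_bin → Spec_MCST_diff_from_2 str_bin (MCST_diff_from_2 str_bin)

-- ===== LEMMAS AND PROOFS =====

-- the common 2-char chunk at index k
def pvChunk (l : List Char) (k : Nat) : List Char := (l.drop (2 * k)).take 2

theorem pv_fd (n : Nat) : PySem.Int.floordiv (n : Int) 2 = ((n / 2 : Nat) : Int) := by
  unfold PySem.Int.floordiv
  rw [Int.fdiv_eq_ediv]
  simp only [if_pos (Or.inl (by decide : (0:Int) ≤ 2))]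
  omega

theorem pv_sliceA (l : List Char) (k : Nat) :
    PySem.List.slice l (some ((k : Int) * 2)) (some ((k : Int) * 2 + 2)) = pvChunk l k := by
  have h := PySem.List.slice_natCast_add l (2 * k) 2
  have h1 : ((k : Int) * 2) = ((2 * k : Nat) : Int) := by omega
  have h2 : ((2 : Nat) : Int) = 2 := rfl
  rw [h2] at h
  rw [h1, h]; rfl

-- A's loop as a map over range
theorem pv_A_eq (l : List Char) :
    (PySem.List.pyRange 0 (PySem.Int.floordiv (l.length : Int) 2 - 1) 1).foldl
      (fun ret i =>
        let x1 := PySem.List.slice l (some (i * 2)) (some (i * 2 + 2))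
        let x2 := PySem.List.slice l (some (i * 2 + 2)) (some (i * 2 + 4))
        if x1 = x2 then ret ++ ['0'] else ret ++ ['1']) ([] : List Char)
      = (List.range (l.length / 2 - 1)).map
          (fun k => if pvChunk l k = pvChunk l (k + 1) then '0' else '1') := by
  have hbody : (fun (ret : List Char) (i : Int) =>
      let x1 := PySem.List.slice l (some (i * 2)) (some (i * 2 + 2))
      let x2 := PySem.List.slice l (some (i * 2 + 2)) (some (i * 2 + 4))
      if x1 = x2 then ret ++ ['0'] else ret ++ ['1'])
      = (fun ret i => ret ++ [if PySem.List.slice l (some (i * 2)) (some (i * 2 + 2))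
          = PySem.List.slice l (some (i * 2 + 2)) (some (i * 2 + 4)) then '0' else '1']) := by
    funext ret i; simp only []; split_ifs <;> rfl
  rw [pv_fd, hbody, PySem.List.foldl_append_singleton_eq_map, PySem.List.pyRange_one, List.map_map]
  have hcnt : (((l.length / 2 : Nat) : Int) - 1 - 0).toNat = l.length / 2 - 1 := by omega
  rw [hcnt]
  apply List.map_congr_left
  intro k _
  have h1 : ((0 : Int) + (k : Int)) * 2 = (k : Int) * 2 := by omega
  have hA2 : PySem.List.slice l (some ((k : Int) * 2 + 2)) (some ((k : Int) * 2 + 4))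
      = pvChunk l (k + 1) := by
    have h2 : (k : Int) * 2 + 2 = ((k + 1 : Nat) : Int) * 2 := by omega
    have h3 : (k : Int) * 2 + 4 = ((k + 1 : Nat) : Int) * 2 + 2 := by omega
    rw [h2, h3]; exact pv_sliceA l (k + 1)
  simp only [Function.comp, h1]
  rw [hA2, pv_sliceA]

-- a full 2-char chunk, elementwise
theorem pv_chunk_pair (l : List Char) (k : Nat) (h : 2 * k + 1 < l.length) :
    pvChunk l k = [pvAt l (2 * k), pvAt l (2 * k + 1)] := by
  have h0 : 2 * k < l.length := by omega
  unfold pvChunk pvAt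
  apply List.ext_getElem
  · simp; omega
  · intro i hi1 hi2
    simp only [List.length_take, List.length_drop] at hi1
    have hi : i < 2 := by omega
    rw [List.getElem_take, List.getElem_drop]
    interval_cases i <;> simp [h0, h]

-- getD on a map over range hits the function
theorem pv_getD_map_range {β : Type} (f : Nat → β) (N j : Nat) (d : β) (h : j < N) :
    (((List.range N).map f).getD j d) = f j := by
  rw [List.getD_eq_getElem?_getD]
  simp [h]

-- the two if-conditions agree on a pair of 2-element lists
theorem pv_if_pair (a b c d : Char) :
    (if [a, b] = [c, d] then '0' else '1') = (if (a == c && b == d) = true then '0' else '1') := by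
  by_cases h1 : a = c <;> by_cases h2 : b = d <;> simp [h1, h2]

-- ===== VERDICT (by name: the statement is the Claim_ definition above) =====
theorem MCST_diff_from_2_spec : Claim_equal_MCST_diff_from_2 := by
  intro s _
  unfold Spec_MCST_diff_from_2 MCST_diff_from_2 MCST_diff_from_2_alt
  simp only [pv_A_eq]
  congr 1
  apply List.map_congr_left
  intro k hk
  simp only [List.mem_range] at hk
  set l := s.toList with hl
  have h1 : 2 * k + 1 < l.length := by omega
  have h2 : 2 * (k + 1) + 1 < l.length := by omega
  rw [pv_getD_map_range _ _ _ _ (by omega : 2 * k < l.length - 2),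
    pv_getD_map_range _ _ _ _ (by omega : 2 * k + 1 < l.length - 2),
    pv_chunk_pair l k h1, pv_chunk_pair l (k + 1) h2,
    show 2 * (k + 1) = 2 * k + 2 by omega, show 2 * k + 2 + 1 = 2 * k + 1 + 2 by omega]
  exact pv_if_pair _ _ _ _
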